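-- pv_equiv track=rewrite | github.com/frankligy/exercise_codes | mitochondria.py | pos_to_frags
-- ===== SOURCE A (Python) =====
-- def pos_to_frags(pos,sequence):
--     frag_array = []
--     if pos:
--         frag_array.append(sequence[0:pos[0]])
--         i = 0
--         while i < len(pos)-1:
--             frag_array.append(sequence[pos[i]+3:pos[i+1]])
--             i += 1
--         frag_array.append(sequence[pos[-1]+3:])
--     return frag_array
-- ===== SOURCE B (Python) =====
-- def pos_to_frags(pos, sequence):
--     frags = []
--     end = len(sequence)
--     for p in reversed(pos):
--         frags.append(sequence[p + 3:end])
--         end = p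
--     if pos:
--         frags.append(sequence[0:end])
--     frags.reverse()
--     return frags
-- ===== Notes on version B (the rewrite author's own statement) =====
-- stated objective: alternative
-- what changed: Builds the fragment list back-to-front: a single reversed pass over pos carrying one moving boundary 'end' (instead of A's forward index loop over adjacent position pairs plus separate head/tail appends), followed by one reverse.
import Mathlib
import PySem

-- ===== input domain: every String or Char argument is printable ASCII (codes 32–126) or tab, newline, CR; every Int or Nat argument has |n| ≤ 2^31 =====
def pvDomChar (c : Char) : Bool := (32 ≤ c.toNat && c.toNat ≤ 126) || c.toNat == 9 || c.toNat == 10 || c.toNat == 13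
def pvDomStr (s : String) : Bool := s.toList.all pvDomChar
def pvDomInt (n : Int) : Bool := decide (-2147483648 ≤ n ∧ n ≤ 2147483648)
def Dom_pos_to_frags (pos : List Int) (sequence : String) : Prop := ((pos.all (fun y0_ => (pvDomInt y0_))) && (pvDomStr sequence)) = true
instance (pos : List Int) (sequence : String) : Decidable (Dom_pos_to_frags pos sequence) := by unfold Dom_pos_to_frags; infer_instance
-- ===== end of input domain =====

-- B builds the result back-to-front: one reversed pass over pos carrying a moving boundary, then a reverse (objective: alternative decomposition).

-- ===== PORT A =====
-- the 'while i < len(pos)-1' loop, carrying i and frag_array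
def pvFragsLoop (pos : List Int) (sequence : String) (i : Nat) (acc : List String) : List String :=
  if i < pos.length - 1 then
    pvFragsLoop pos sequence (i + 1)
      (acc ++ [PySem.Str.slice sequence (some ((PySem.List.pyGet? pos (i : Int)).getD 0 + 3))
                                        (some ((PySem.List.pyGet? pos ((i : Int) + 1)).getD 0))])
  else acc
termination_by pos.length - 1 - i

def pos_to_frags (pos : List Int) (sequence : String) : List String :=
  match pos with
  | [] => []  -- 'if pos:' false: frag_array stays []
  | p0 :: _ =>
    let acc := [PySem.Str.slice sequence (some 0) (some p0)]
    let acc := pvFragsLoop pos sequence 0 acc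
    acc ++ [PySem.Str.slice sequence (some ((PySem.List.pyGet? pos (-1)).getD 0 + 3)) none]

-- ===== PORT B =====
-- 'for p in reversed(pos)' carrying (frags, end); then the guarded prefix append; then frags.reverse()
def pos_to_frags_alt (pos : List Int) (sequence : String) : List String :=
  let st := pos.reverse.foldl
      (fun (st : List String × Int) p =>
        (st.1 ++ [PySem.Str.slice sequence (some (p + 3)) (some st.2)], p))
      (([] : List String), PySem.Str.len sequence)
  let frags := if pos.isEmpty then st.1
               else st.1 ++ [PySem.Str.slice sequence (some 0) (some st.2)]
  frags.reverse

-- ===== PRECONDITION & SPEC =====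
def Spec_pos_to_frags (pos : List Int) (sequence : String) (out : List String) : Prop := out = pos_to_frags_alt pos sequence
instance (pos : List Int) (sequence : String) (out : List String) : Decidable (Spec_pos_to_frags pos sequence out) := by unfold Spec_pos_to_frags; infer_instance

-- ===== CLAIM (what is proved, stated in full; the proofs are below) =====
def Claim_equal_pos_to_frags : Prop := ∀ (pos : List Int) (sequence : String), Dom_pos_to_frags pos sequence → Spec_pos_to_frags pos sequence (pos_to_frags pos sequence)

-- ===== LEMMAS AND PROOFS =====

-- sequence[a:] = sequence[a:len(sequence)]
theorem pv_slice_none_eq_len (s : String) (a : Int) :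
    PySem.Str.slice s (some a) none = PySem.Str.slice s (some a) (some ((s.toList.length : Nat) : Int)) := by
  simp [PySem.Str.slice, PySem.Chars.slice_eq_listSlice, PySem.List.slice]

theorem pv_str_len (s : String) : PySem.Str.len s = ((s.toList.length : Nat) : Int) := by
  simp [PySem.Str.len]

-- pos[-1] on a nonempty list is its last element
theorem pv_pyGet_neg_one (pos : List Int) (h : pos ≠ []) :
    (PySem.List.pyGet? pos (-1)).getD 0 = pos.getLast h := by
  have hn : 1 ≤ pos.length := List.length_pos_of_ne_nil h
  rw [PySem.List.pyGet?]
  simp only [PySem.List.pyIdx?]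
  norm_num
  rw [if_pos hn]
  simp only [Option.bind_some]
  rw [List.getElem?_eq_getElem (by omega)]
  simp [List.getLast_eq_getElem]

-- A's while loop appends one fragment per adjacent pair of pos
theorem pvFragsLoop_spec (pos : List Int) (sequence : String) (i : Nat) (acc : List String) :
    pvFragsLoop pos sequence i acc =
      acc ++ ((pos.zip pos.tail).drop i).map
        (fun q => PySem.Str.slice sequence (some (q.1 + 3)) (some q.2)) := by
  fun_induction pvFragsLoop pos sequence i acc with
  | case1 i acc hlt ih =>
    rw [ih]
    have hzl : (pos.zip pos.tail).length = pos.length - 1 := by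
      simp [List.length_zip, List.length_tail]
    have hi : i < (pos.zip pos.tail).length := by omega
    rw [List.drop_eq_getElem_cons hi]
    have h1 : i < pos.length := by omega
    have h2 : i + 1 < pos.length := by omega
    have hg : (pos.zip pos.tail)[i] = (pos[i], pos[i+1]) := by
      rw [List.getElem_zip]
      congr 1
      rw [List.getElem_tail]
    have hb : (PySem.List.pyGet? pos ((i : Int) + 1)).getD 0 = pos[i+1] := by
      have : ((i : Int) + 1) = ((i + 1 : Nat) : Int) := by push_cast; ring
      rw [this, PySem.List.pyGet?_natCast, List.getElem?_eq_getElem h2]; rfl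
    simp [hg, hb, List.getElem?_eq_getElem h1]
  | case2 i acc hlt =>
    have : (pos.zip pos.tail).length ≤ i := by
      simp [List.length_zip, List.length_tail]; omega
    rw [List.drop_eq_nil_of_le this]; simp

-- B's reversed-pass fold, characterised: it produces the middle+tail fragments in reverse,
-- and ends with the first position (or e0) as the pending boundary
theorem pv_foldr_spec (l : List Int) (e0 : Int) (s : String) :
    l.foldr (fun p (st : List String × Int) =>
        (st.1 ++ [PySem.Str.slice s (some (p + 3)) (some st.2)], p)) (([] : List String), e0) =
      (((l.zip (l.tail ++ [e0])).map
          (fun q => PySem.Str.slice s (some (q.1 + 3)) (some q.2))).reverse,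
       l.headD e0) := by
  induction l with
  | nil => simp
  | cons p rest ih =>
    rw [List.foldr_cons, ih]
    cases rest with
    | nil => simp
    | cons q r => simp

-- zipping pos with tail++[L] splits into the adjacent pairs plus the last-position pair
theorem pv_zip_tail_append (pos : List Int) (h : pos ≠ []) (L : Int) :
    pos.zip (pos.tail ++ [L]) = pos.zip pos.tail ++ [(pos.getLast h, L)] := by
  induction pos with
  | nil => exact absurd rfl h
  | cons p ps ih =>
    cases ps with
    | nil => simp
    | cons q r =>
      have h2 : (q :: r : List Int) ≠ [] := by simp
      have hih := ih h2
      simp only [List.tail_cons] at hih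
      simp only [List.tail_cons, List.cons_append, List.zip_cons_cons]
      rw [hih]
      simp [List.getLast_cons h2]

-- ===== VERDICT (by name: the statement is the Claim_ definition above) =====
theorem pos_to_frags_spec : Claim_equal_pos_to_frags := by
  intro pos sequence _
  unfold Spec_pos_to_frags pos_to_frags pos_to_frags_alt
  cases pos with
  | nil => rfl
  | cons p ps =>
    have hne : (p :: ps : List Int) ≠ [] := by simp
    simp only [List.foldl_reverse, List.isEmpty_cons]
    rw [pv_foldr_spec, pvFragsLoop_spec, pv_pyGet_neg_one _ hne, pv_slice_none_eq_len, pv_str_len]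
    have hz := pv_zip_tail_append (p :: ps) hne ((sequence.toList.length : Nat) : Int)
    simp only [List.tail_cons] at hz
    simp only [List.tail_cons, List.drop_zero, List.headD_cons]
    rw [hz]
    simp
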